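-- pv_equiv track=rewrite | github.com/rshon/algorithm-inside | Chapter17/문제 85_bypartity_by_highest_score.py | get_max_profit_position
-- ===== SOURCE A (Python) =====
-- from typing import List
--
-- def get_max_profit_position(nums: List[int]) -> List[int]:
--     n = len(nums)
--     zeros = [0] * (n + 1)
--     ones = [0] * (n + 1)
--
--     for i in range(1, len(nums) + 1):
--         zeros[i] = zeros[i - 1]
--         if 0 == nums[i - 1]:
--             zeros[i] += 1
--
--     for i in range(len(nums) - 1, -1, -1):
--         ones[i] = ones[i + 1]
--         if 1 == nums[i]:
--             ones[i] += 1
--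
--     mx = 0
--     for i in range(n + 1):
--         mx = max(mx, ones[i] + zeros[i])
--
--     res = []
--     for i in range(n + 1):
--         if mx == ones[i] + zeros[i]:
--             res.append(i)
--
--     return res
-- ===== SOURCE B (Python) =====
-- from typing import List
--
-- def get_max_profit_position(nums: List[int]) -> List[int]:
--     # One pass: balance = zeros_before - ones_before; score(i) = total_ones + balance(i),
--     # so the positions with maximal score are the positions with maximal balance.
--     bal = 0
--     best = 0
--     bals = [0]
--     for x in nums:
--         if x == 0:
--             bal += 1
--         elif x == 1:
--             bal -= 1
--         bals.append(bal)
--         if bal > best: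
--             best = bal
--     return [i for i, b in enumerate(bals) if b == best]
-- ===== Notes on version B (the rewrite author's own statement) =====
-- stated objective: faster
-- what changed: Replaces the prefix-zeros array, suffix-ones array and two further index passes by a single forward scan of a running balance (zeros-before minus ones-before), using score(i) = total_ones + balance(i), then one comprehension collecting the argmax positions.
import Mathlib
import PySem

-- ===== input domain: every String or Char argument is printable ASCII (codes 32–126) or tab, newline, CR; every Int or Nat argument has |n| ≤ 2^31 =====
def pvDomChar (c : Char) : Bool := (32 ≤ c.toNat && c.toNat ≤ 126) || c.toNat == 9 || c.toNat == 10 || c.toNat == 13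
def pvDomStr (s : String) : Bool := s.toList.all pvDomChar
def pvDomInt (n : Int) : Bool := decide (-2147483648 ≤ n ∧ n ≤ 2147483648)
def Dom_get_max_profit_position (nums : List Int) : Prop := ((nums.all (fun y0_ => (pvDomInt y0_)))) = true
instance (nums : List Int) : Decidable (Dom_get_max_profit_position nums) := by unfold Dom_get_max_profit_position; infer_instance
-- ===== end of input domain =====

-- B replaces A's two auxiliary arrays and four index loops by one running-balance scan; objective: simpler.

-- ===== PORT A =====
-- body of A's first for-loop (zeros[i] = zeros[i-1]; if 0 == nums[i-1]: zeros[i] += 1)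
def pvStepZ (nums : List Int) (z : List Int) (i : Int) : List Int :=
  let z := PySem.List.pySetD z i (PySem.List.pyGetD z (i - 1) 0)
  if PySem.List.pyGetD nums (i - 1) 0 = 0 then
    PySem.List.pySetD z i (PySem.List.pyGetD z i 0 + 1)
  else z

-- body of A's second for-loop (ones[i] = ones[i+1]; if 1 == nums[i]: ones[i] += 1)
def pvStepO (nums : List Int) (o : List Int) (i : Int) : List Int :=
  let o := PySem.List.pySetD o i (PySem.List.pyGetD o (i + 1) 0)
  if PySem.List.pyGetD nums i 0 = 1 then
    PySem.List.pySetD o i (PySem.List.pyGetD o i 0 + 1)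
  else o

def get_max_profit_position (nums : List Int) : List Int :=
  let n : Int := PySem.List.len nums
  let zeros : List Int := List.replicate (n + 1).toNat 0
  let ones : List Int := List.replicate (n + 1).toNat 0
  let zeros := (PySem.List.pyRange 1 (PySem.List.len nums + 1) 1).foldl (pvStepZ nums) zeros
  let ones := (PySem.List.pyRange (PySem.List.len nums - 1) (-1) (-1)).foldl (pvStepO nums) ones
  let mx := (PySem.List.pyRange 0 (n + 1) 1).foldl (fun mx i =>
      max mx (PySem.List.pyGetD ones i 0 + PySem.List.pyGetD zeros i 0)) 0
  (PySem.List.pyRange 0 (n + 1) 1).foldl (fun res i =>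
      if mx = PySem.List.pyGetD ones i 0 + PySem.List.pyGetD zeros i 0 then res ++ [i] else res) []

-- ===== PORT B =====
-- body of B's single scan: update balance, append it, track the running maximum
def pvStepB (st : Int × Int × List Int) (x : Int) : Int × Int × List Int :=
  let bal := if x = 0 then st.1 + 1 else if x = 1 then st.1 - 1 else st.1
  let best := if bal > st.2.1 then bal else st.2.1
  (bal, best, st.2.2 ++ [bal])

def get_max_profit_position_alt (nums : List Int) : List Int :=
  let s := nums.foldl pvStepB (0, 0, ([0] : List Int))
  ((PySem.List.enumerate s.2.2 0).filter (fun p => p.2 == s.2.1)).map (fun p => p.1)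

-- ===== PRECONDITION & SPEC =====
def Spec_get_max_profit_position (nums : List Int) (out : List Int) : Prop := out = get_max_profit_position_alt nums
instance (nums : List Int) (out : List Int) : Decidable (Spec_get_max_profit_position nums out) := by unfold Spec_get_max_profit_position; infer_instance

-- ===== CLAIM (what is proved, stated in full; the proofs are below) =====
def Claim_equal_get_max_profit_position : Prop := ∀ (nums : List Int), Dom_get_max_profit_position nums → Spec_get_max_profit_position nums (get_max_profit_position nums)

-- ===== LEMMAS AND PROOFS =====

-- number of zeros in the first k elements
def pvZc (l : List Int) (k : Nat) : Int := ((l.take k).countP (fun x => x == 0) : Int)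
-- number of ones in the first k elements
def pvOc (l : List Int) (k : Nat) : Int := ((l.take k).countP (fun x => x == 1) : Int)
-- number of ones from position k on
def pvOs (l : List Int) (k : Nat) : Int := ((l.drop k).countP (fun x => x == 1) : Int)
-- B's balance step and balance after a k-prefix
def pvStep (b x : Int) : Int := if x = 0 then b + 1 else if x = 1 then b - 1 else b
def pvW (l : List Int) (k : Nat) : Int := (l.take k).foldl pvStep 0
-- the abstract values of A's running max and of B's running max
def pvMx (l : List Int) : Int :=
  (List.range (l.length + 1)).foldl (fun a k => max a (pvOs l k + pvZc l k)) 0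
def pvBest (l : List Int) : Int :=
  (List.range (l.length + 1)).foldl (fun a k => max a (pvW l k)) 0

theorem pvStep_foldl (m : List Int) (b : Int) :
    m.foldl pvStep b = b + (m.countP (fun x => x == 0) : Int) - (m.countP (fun x => x == 1) : Int) := by
  induction m generalizing b with
  | nil => simp
  | cons x t ih =>
      simp only [List.foldl_cons, List.countP_cons, ih, pvStep]
      by_cases h0 : x = 0 <;> by_cases h1 : x = 1 <;> simp [h0, h1] <;> omega

theorem pvW_eq (l : List Int) (k : Nat) : pvW l k = pvZc l k - pvOc l k := by
  simp [pvW, pvZc, pvOc, pvStep_foldl]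

theorem pvOs_add_pvOc (l : List Int) (k : Nat) (h : k ≤ l.length) :
    pvOc l k + pvOs l k = pvOs l 0 := by
  simp only [pvOc, pvOs, List.drop_zero]
  rw [show (l.countP (fun x => x == 1)) = ((l.take k ++ l.drop k).countP (fun x => x == 1)) by
    rw [List.take_append_drop]]
  rw [List.countP_append]; push_cast; ring

theorem pvZc_succ (l : List Int) (m : Nat) (h : m < l.length) :
    pvZc l (m + 1) = pvZc l m + (if l[m] = 0 then 1 else 0) := by
  simp only [pvZc, List.take_succ, List.countP_append, List.getElem?_eq_getElem h]
  by_cases h0 : l[m] = 0 <;> simp [h0]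

theorem pvOs_pred (l : List Int) (j : Nat) (h : j < l.length) :
    pvOs l j = pvOs l (j + 1) + (if l[j] = 1 then 1 else 0) := by
  simp only [pvOs]
  rw [List.drop_eq_getElem_cons h, List.countP_cons]
  by_cases h1 : l[j] = 1 <;> simp [h1]

-- set on a map-over-range
theorem pv_set_map_range {N j : Nat} (g : Nat → Int) (v : Int) (hj : j < N) :
    ((List.range N).map g).set j v = (List.range N).map (fun k => if k = j then v else g k) := by
  apply List.ext_getElem
  · simp
  · intro k hk1 hk2
    simp only [List.getElem_map, List.getElem_range] at *
    rw [List.getElem_set]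
    simp only [List.getElem_map, List.getElem_range]
    by_cases h : k = j
    · subst h; simp
    · rw [if_neg (fun hh => h hh.symm), if_neg h]

-- A's first loop computes the prefix-zero counts
theorem pvZerosAux (l : List Int) (m : Nat) (hm : m ≤ l.length) :
    (PySem.List.pyRange 1 ((m : Int) + 1) 1).foldl (pvStepZ l)
        ((List.range (l.length + 1)).map (fun _ => (0 : Int)))
      = (List.range (l.length + 1)).map (fun k => if k ≤ m then pvZc l k else 0) := by
  induction m with
  | zero =>
      rw [PySem.List.pyRange_one_eq_nil (by norm_num)]
      simp only [List.foldl_nil]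
      apply List.map_congr_left
      intro k _
      rcases Nat.eq_zero_or_pos k with h | h
      · subst h; simp [pvZc]
      · rw [if_neg (by omega)]
  | succ m ih =>
      have hm' : m ≤ l.length := by omega
      have hml : m < l.length := by omega
      have hsplit : PySem.List.pyRange 1 ((↑(m + 1) : Int) + 1) 1
          = PySem.List.pyRange 1 ((m : Int) + 1) 1 ++ [(m : Int) + 1] := by
        push_cast
        exact PySem.List.pyRange_one_succ_right (by omega)
      rw [hsplit, List.foldl_append, ih hm']
      simp only [List.foldl_cons, List.foldl_nil]
      unfold pvStepZ
      rw [show ((m : Int) + 1 - 1) = ((m : Nat) : Int) by ring]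
      rw [show ((m : Int) + 1) = ((m + 1 : Nat) : Int) by push_cast; ring]
      simp only [PySem.List.pyGetD_natCast, PySem.List.pySetD_natCast]
      rw [PySem.List.getD_map_range _ _ _ _ (by omega)]
      rw [List.getD_eq_getElem l 0 hml]
      rw [pv_set_map_range _ _ (by omega)]
      rw [PySem.List.getD_map_range _ _ _ _ (by omega)]
      rw [if_pos rfl, if_pos (le_refl m)]
      split_ifs with hx
      · rw [pv_set_map_range _ _ (by omega)]
        apply List.map_congr_left
        intro k hk
        have hkN : k < l.length + 1 := by simpa using hk
        by_cases hkm : k = m + 1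
        · subst hkm
          rw [if_pos rfl, if_pos (by omega)]
          rw [pvZc_succ l m hml, if_pos hx]
        · rw [if_neg hkm, if_neg hkm]
          split_ifs <;> first | rfl | omega
      · apply List.map_congr_left
        intro k hk
        have hkN : k < l.length + 1 := by simpa using hk
        by_cases hkm : k = m + 1
        · subst hkm
          rw [if_pos rfl, if_pos (by omega)]
          rw [pvZc_succ l m hml, if_neg hx]
          ring
        · rw [if_neg hkm]
          split_ifs <;> first | rfl | omega

-- A's second loop computes the suffix-one counts
theorem pvOnesAux (l : List Int) (j : Nat) (hj : j ≤ l.length) :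
    (PySem.List.pyRange ((j : Int) - 1) (-1) (-1)).foldl (pvStepO l)
        ((List.range (l.length + 1)).map (fun k => if j ≤ k then pvOs l k else 0))
      = (List.range (l.length + 1)).map (fun k => pvOs l k) := by
  induction j with
  | zero =>
      rw [show ((0 : Nat) : Int) - 1 = -1 by norm_num]
      rw [PySem.List.pyRange_neg_one_eq_nil (by norm_num)]
      simp only [List.foldl_nil, Nat.zero_le, if_true]
  | succ j ih =>
      have hjl : j < l.length := by omega
      rw [show ((j + 1 : Nat) : Int) - 1 = ((j : Nat) : Int) by push_cast; ring]
      rw [PySem.List.pyRange_neg_one_cons (by omega)]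
      simp only [List.foldl_cons]
      have hstep : pvStepO l ((List.range (l.length + 1)).map
            (fun k => if j + 1 ≤ k then pvOs l k else 0)) ((j : Nat) : Int)
          = (List.range (l.length + 1)).map (fun k => if j ≤ k then pvOs l k else 0) := by
        unfold pvStepO
        rw [show ((j : Int) + 1) = ((j + 1 : Nat) : Int) by push_cast; ring]
        simp only [PySem.List.pyGetD_natCast, PySem.List.pySetD_natCast]
        rw [PySem.List.getD_map_range _ _ _ _ (by omega)]
        rw [List.getD_eq_getElem l 0 hjl]
        rw [pv_set_map_range _ _ (by omega)]
        rw [PySem.List.getD_map_range _ _ _ _ (by omega)]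
        rw [if_pos rfl, if_pos (le_refl (j + 1))]
        split_ifs with hx
        · rw [pv_set_map_range _ _ (by omega)]
          apply List.map_congr_left
          intro k hk
          have hkN : k < l.length + 1 := by simpa using hk
          by_cases hkj : k = j
          · rw [hkj]
            rw [if_pos rfl, if_pos (le_refl j)]
            rw [pvOs_pred l j hjl, if_pos hx]
          · rw [if_neg hkj, if_neg hkj]
            split_ifs <;> first | rfl | omega
        · apply List.map_congr_left
          intro k hk
          have hkN : k < l.length + 1 := by simpa using hk
          by_cases hkj : k = j
          · rw [hkj]
            rw [if_pos rfl, if_pos (le_refl j)]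
            rw [pvOs_pred l j hjl, if_neg hx]
            ring
          · rw [if_neg hkj]
            split_ifs <;> first | rfl | omega
      rw [hstep]
      exact ih (by omega)

-- A's running-max loop, with the array reads resolved
theorem pvMaxLoopGet (l : List Int) (F G : Nat → Int) :
    (List.range (l.length + 1)).foldl (fun a k => max a
        (PySem.List.pyGetD ((List.range (l.length + 1)).map (fun k => F k)) ((k : Nat) : Int) 0
          + PySem.List.pyGetD ((List.range (l.length + 1)).map (fun k => G k)) ((k : Nat) : Int) 0)) 0
      = (List.range (l.length + 1)).foldl (fun a k => max a (F k + G k)) 0 := by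
  apply PySem.List.foldl_congr_mem
  intro acc k hk
  have hkN : k < l.length + 1 := List.mem_range.mp hk
  simp only [PySem.List.pyGetD_natCast]
  rw [PySem.List.getD_map_range _ _ _ _ hkN, PySem.List.getD_map_range _ _ _ _ hkN]

-- an append-if loop over a range is a filter
theorem pvResFilter (N : Nat) (p : Nat → Prop) [DecidablePred p] :
    (List.range N).foldl (fun res k => if p k then res ++ [(k : Int)] else res) []
      = ((List.range N).filter (fun k => decide (p k))).map (fun k : Nat => (k : Int)) := by
  induction N with
  | zero => rfl
  | succ n ih =>
      rw [List.range_succ, List.foldl_append, ih]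
      simp only [List.foldl_cons, List.foldl_nil, List.filter_append, List.map_append]
      by_cases h : p n <;> simp [h, List.filter]

-- A's result loop, with the array reads resolved
theorem pvResLoopGet (l : List Int) (mx : Int) (F G : Nat → Int) :
    (List.range (l.length + 1)).foldl (fun res k => if mx =
        PySem.List.pyGetD ((List.range (l.length + 1)).map (fun k => F k)) ((k : Nat) : Int) 0
          + PySem.List.pyGetD ((List.range (l.length + 1)).map (fun k => G k)) ((k : Nat) : Int) 0
        then res ++ [((k : Nat) : Int)] else res) []
      = ((List.range (l.length + 1)).filter (fun k => decide (mx = F k + G k))).map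
          (fun k : Nat => (k : Int)) := by
  have hcong := PySem.List.foldl_congr_mem (List.range (l.length + 1))
    (fun res k => if mx =
        PySem.List.pyGetD ((List.range (l.length + 1)).map (fun k => F k)) ((k : Nat) : Int) 0
          + PySem.List.pyGetD ((List.range (l.length + 1)).map (fun k => G k)) ((k : Nat) : Int) 0
        then res ++ [((k : Nat) : Int)] else res)
    (fun res k => if mx = F k + G k then res ++ [((k : Nat) : Int)] else res) ([] : List Int) ?_
  · rw [hcong]
    exact pvResFilter (l.length + 1) (fun k => mx = F k + G k)
  · intro acc k hk
    have hkN : k < l.length + 1 := List.mem_range.mp hk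
    simp only [PySem.List.pyGetD_natCast]
    rw [PySem.List.getD_map_range _ _ _ _ hkN, PySem.List.getD_map_range _ _ _ _ hkN]

-- closed form of A
theorem pvA_eq (l : List Int) :
    get_max_profit_position l
      = ((List.range (l.length + 1)).filter
          (fun k => decide (pvMx l = pvOs l k + pvZc l k))).map (fun k : Nat => (k : Int)) := by
  simp only [get_max_profit_position, PySem.List.len_eq]
  have hrep : List.replicate (((l.length : Int) + 1)).toNat (0 : Int)
      = (List.range (l.length + 1)).map (fun _ => (0 : Int)) := by
    rw [show (((l.length : Int) + 1)).toNat = l.length + 1 by omega]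
    apply List.ext_getElem <;> simp
  have hz : (PySem.List.pyRange 1 ((l.length : Int) + 1) 1).foldl (pvStepZ l)
        (List.replicate (((l.length : Int) + 1)).toNat 0)
      = (List.range (l.length + 1)).map (fun k => pvZc l k) := by
    rw [hrep, pvZerosAux l l.length le_rfl]
    apply List.map_congr_left
    intro k hk
    rw [if_pos (by have := List.mem_range.mp hk; omega)]
  have hones_init : List.replicate (((l.length : Int) + 1)).toNat (0 : Int)
      = (List.range (l.length + 1)).map (fun k => if l.length ≤ k then pvOs l k else 0) := by
    rw [show (((l.length : Int) + 1)).toNat = l.length + 1 by omega]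
    apply List.ext_getElem
    · simp
    · intro k h1 h2
      simp only [List.getElem_replicate, List.getElem_map, List.getElem_range]
      simp only [List.length_replicate] at h1
      split_ifs with h
      · have hk : k = l.length := by omega
        subst hk
        simp [pvOs]
      · rfl
  have ho : (PySem.List.pyRange ((l.length : Int) - 1) (-1) (-1)).foldl (pvStepO l)
        (List.replicate (((l.length : Int) + 1)).toNat 0)
      = (List.range (l.length + 1)).map (fun k => pvOs l k) := by
    rw [hones_init]
    exact pvOnesAux l l.length le_rfl
  simp only [hz, ho]
  simp only [show ((l.length : Int) + 1) = ((l.length + 1 : Nat) : Int) by push_cast; ring]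
  simp only [PySem.List.pyRange_zero_natCast, List.foldl_map]
  simp only [pvMaxLoopGet, pvResLoopGet]
  unfold pvMx
  rfl

-- closed form of B's fold state
theorem pvFoldB (l : List Int) :
    l.foldl pvStepB ((0 : Int), (0 : Int), ([0] : List Int))
      = (pvW l l.length, pvBest l, (List.range (l.length + 1)).map (fun k => pvW l k)) := by
  induction l using List.reverseRecOn with
  | nil => simp [pvW, pvBest]
  | append_singleton l x ih =>
      rw [List.foldl_append, ih]
      simp only [List.foldl_cons, List.foldl_nil]
      have hlen : (l ++ [x]).length = l.length + 1 := by simp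
      have hW : ∀ k, k ≤ l.length → pvW (l ++ [x]) k = pvW l k := by
        intro k hk
        unfold pvW
        rw [List.take_append_of_le_length hk]
      have hWtop : pvW (l ++ [x]) (l.length + 1) = pvStep (pvW l l.length) x := by
        unfold pvW
        rw [List.take_of_length_le (by simp), List.take_length, List.foldl_append]
        simp only [List.foldl_cons, List.foldl_nil]
      have hbals : (List.range ((l ++ [x]).length + 1)).map (fun k => pvW (l ++ [x]) k)
          = (List.range (l.length + 1)).map (fun k => pvW l k) ++ [pvStep (pvW l l.length) x] := by
        rw [hlen, List.range_succ, List.map_append]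
        congr 1
        · apply List.map_congr_left
          intro k hk
          exact hW k (by have := List.mem_range.mp hk; omega)
        · simp only [List.map_cons, List.map_nil]
          rw [hWtop]
      have hbest : pvBest (l ++ [x]) = max (pvBest l) (pvStep (pvW l l.length) x) := by
        unfold pvBest
        rw [hlen, List.range_succ, List.foldl_append]
        simp only [List.foldl_cons, List.foldl_nil]
        rw [hWtop]
        congr 1
        apply PySem.List.foldl_congr_mem
        intro acc k hk
        rw [hW k (by have := List.mem_range.mp hk; omega)]
      rw [hbals, hbest, hlen, hWtop]
      unfold pvStepB
      dsimp only
      have hbal' : (if x = 0 then pvW l l.length + 1 else if x = 1 then pvW l l.length - 1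
          else pvW l l.length) = pvStep (pvW l l.length) x := rfl
      rw [hbal']
      have hmax : (if pvStep (pvW l l.length) x > pvBest l then pvStep (pvW l l.length) x
          else pvBest l) = max (pvBest l) (pvStep (pvW l l.length) x) := by
        split_ifs with h <;> omega
      rw [hmax]

-- closed form of B
theorem pvB_eq (l : List Int) :
    get_max_profit_position_alt l
      = ((List.range (l.length + 1)).filter
          (fun k => decide (pvW l k = pvBest l))).map (fun k : Nat => (k : Int)) := by
  simp only [get_max_profit_position_alt, pvFoldB]
  rw [PySem.List.enumerate_eq_map_pyRange _ (0 : Int)]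
  simp only [PySem.List.len_eq, List.length_map, List.length_range]
  rw [PySem.List.pyRange_zero_natCast]
  rw [List.map_map, List.filter_map, List.map_map]
  have hq : ∀ k ∈ List.range (l.length + 1),
      ((fun p => p.2 == pvBest l) ∘ (fun j => (j, PySem.List.pyGetD
          ((List.range (l.length + 1)).map (fun k => pvW l k)) j 0)) ∘ (fun k : Nat => (k : Int))) k
        = (fun k => decide (pvW l k = pvBest l)) k := by
    intro k hk
    have hkN : k < l.length + 1 := List.mem_range.mp hk
    simp only [Function.comp_apply, PySem.List.pyGetD_natCast]
    rw [PySem.List.getD_map_range _ _ _ _ hkN]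
    by_cases h : pvW l k = pvBest l <;> simp [h]
  rw [List.filter_congr hq]
  simp only [Function.comp_def]

theorem pvShift (L : List Nat) (f : Nat → Int) (c i : Int) :
    L.foldl (fun a k => max a (c + f k)) (c + i) = c + L.foldl (fun a k => max a (f k)) i := by
  induction L generalizing i with
  | nil => rfl
  | cons x t ih =>
      simp only [List.foldl_cons]
      rw [show max (c + i) (c + f x) = c + max i (f x) by omega, ih]

theorem pvMx_eq (l : List Int) : pvMx l = pvOs l 0 + pvBest l := by
  unfold pvMx pvBest
  have hcong : (List.range (l.length + 1)).foldl (fun a k => max a (pvOs l k + pvZc l k)) 0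
      = (List.range (l.length + 1)).foldl (fun a k => max a (pvOs l 0 + pvW l k)) 0 := by
    apply PySem.List.foldl_congr_mem
    intro acc k hk
    have hk' : k ≤ l.length := by have := List.mem_range.mp hk; omega
    have h1 := pvOs_add_pvOc l k hk'
    have h2 := pvW_eq l k
    have h3 : pvOs l k + pvZc l k = pvOs l 0 + pvW l k := by omega
    rw [h3]
  rw [hcong]
  simp only [List.range_succ_eq_map, List.foldl_cons]
  have h0 : pvW l 0 = 0 := by simp [pvW]
  rw [h0]
  have hT : 0 ≤ pvOs l 0 := by unfold pvOs; exact Int.natCast_nonneg _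
  rw [show max (0 : Int) (pvOs l 0 + 0) = pvOs l 0 + 0 by omega]
  rw [show max (0 : Int) 0 = (0 : Int) by omega]
  exact pvShift _ _ _ 0

-- ===== VERDICT (by name: the statement is the Claim_ definition above) =====
theorem get_max_profit_position_spec : Claim_equal_get_max_profit_position := by
  intro nums _
  unfold Spec_get_max_profit_position
  rw [pvA_eq, pvB_eq]
  have hf : ∀ k ∈ List.range (nums.length + 1),
      (fun k => decide (pvMx nums = pvOs nums k + pvZc nums k)) k
        = (fun k => decide (pvW nums k = pvBest nums)) k := by
    intro k hk
    have hk' : k ≤ nums.length := by have := List.mem_range.mp hk; omega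
    have h1 := pvOs_add_pvOc nums k hk'
    have h2 := pvW_eq nums k
    rw [pvMx_eq]
    simp only [decide_eq_decide]
    omega
  rw [List.filter_congr hf]
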